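-- pv_equiv track=rewrite | github.com/yanyanSann/PromptTPP | model_run/neural_tpp/utils/misc.py | make_config_string
-- ===== SOURCE A (Python) =====
-- def make_config_string(config, max_num_key=4):
--     """
--
--     Generate a name for config files
--     Args:
--         config: dict of config
--         max_num_key: max number of keys to concat in the output
--
--     Returns:
--         a concatenated string from config dict
--     """
--     str_config = ''
--     num_key = 0
--     for k, v in config.items():
--         if num_key < max_num_key:  # for the moment we only record model name
--             if k == 'name':
--                 str_config += str(v) + '_'
--                 num_key += 1
--     return str_config[:-1]
-- ===== SOURCE B (Python) =====
-- def make_config_string(config, max_num_key=4):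
--     return str(config['name']) if max_num_key >= 1 and 'name' in config else ''
-- ===== Notes on version B (the rewrite author's own statement) =====
-- stated objective: simpler
-- what changed: A's items() scan with a num_key counter and trailing-'_' strip is replaced by a closed-form expression: a direct membership test and lookup of the single key 'name' the loop can ever record, guarded by max_num_key >= 1.
import Mathlib
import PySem

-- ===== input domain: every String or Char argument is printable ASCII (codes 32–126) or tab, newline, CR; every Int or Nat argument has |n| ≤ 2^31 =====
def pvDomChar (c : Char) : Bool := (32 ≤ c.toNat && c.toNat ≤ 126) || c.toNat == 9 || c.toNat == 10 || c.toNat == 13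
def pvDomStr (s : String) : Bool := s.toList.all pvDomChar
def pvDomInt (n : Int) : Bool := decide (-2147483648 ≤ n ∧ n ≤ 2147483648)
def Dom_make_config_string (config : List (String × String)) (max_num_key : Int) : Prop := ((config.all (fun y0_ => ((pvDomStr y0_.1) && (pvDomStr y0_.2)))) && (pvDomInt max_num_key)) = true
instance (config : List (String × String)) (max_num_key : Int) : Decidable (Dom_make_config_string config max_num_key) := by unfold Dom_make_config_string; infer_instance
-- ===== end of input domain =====

-- B replaces A's items() scan (counter + trailing-'_' strip) by a closed-form membership test and
-- lookup of the single key 'name' the loop can ever record, guarded by max_num_key >= 1 (objective: simpler).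

-- ===== PORT A =====
def make_config_string (config : List (String × String)) (max_num_key : Int) : String :=
  let st := config.foldl
    (fun (acc : String × Int) kv =>
      if acc.2 < max_num_key then
        if kv.1 = "name" then (acc.1 ++ kv.2 ++ "_", acc.2 + 1) else acc
      else acc)
    ("", 0)
  PySem.Str.slice st.1 none (some (-1))

-- ===== PORT B =====
def make_config_string_alt (config : List (String × String)) (max_num_key : Int) : String :=
  if 1 ≤ max_num_key then
    match (PySem.Dict.mk config).get? "name" with
    | some v => v
    | none => ""
  else ""

-- ===== PRECONDITION & SPEC =====
-- Pre_ states the representation invariant of a Python dict: the association list has pairwise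
-- distinct keys (every actual dict argument satisfies it; a duplicate-key list represents no dict).
def Pre_make_config_string (config : List (String × String)) (max_num_key : Int) : Prop :=
  (config.map Prod.fst).Nodup
instance (config : List (String × String)) (max_num_key : Int) : Decidable (Pre_make_config_string config max_num_key) := by unfold Pre_make_config_string; infer_instance

def pvWitness_make_config_string : (List (String × String)) × Int := ([("name", "x"), ("lr", "0.1")], 4)

def Spec_make_config_string (config : List (String × String)) (max_num_key : Int) (out : String) : Prop := out = make_config_string_alt config max_num_key
instance (config : List (String × String)) (max_num_key : Int) (out : String) : Decidable (Spec_make_config_string config max_num_key out) := by unfold Spec_make_config_string; infer_instance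

-- ===== CLAIM (what is proved, stated in full; the proofs are below) =====
def Claim_equal_make_config_string : Prop := ∀ (config : List (String × String)) (max_num_key : Int), Dom_make_config_string config max_num_key → Pre_make_config_string config max_num_key → Spec_make_config_string config max_num_key (make_config_string config max_num_key)



-- ===== LEMMAS AND PROOFS =====

-- the loop body never changes the accumulator once the counter has reached max_num_key
theorem pv_foldl_stuck (l : List (String × String)) (m : Int) (acc : String × Int)
    (h : ¬ acc.2 < m) :
    l.foldl (fun (acc : String × Int) kv =>
      if acc.2 < m then
        if kv.1 = "name" then (acc.1 ++ kv.2 ++ "_", acc.2 + 1) else acc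
      else acc) acc = acc := by
  induction l with
  | nil => rfl
  | cons kv t ih => simp [h, ih]

-- the loop body never changes the accumulator over a list with no 'name' key
theorem pv_foldl_no_name (l : List (String × String)) (m : Int) (acc : String × Int)
    (h : "name" ∉ l.map Prod.fst) :
    l.foldl (fun (acc : String × Int) kv =>
      if acc.2 < m then
        if kv.1 = "name" then (acc.1 ++ kv.2 ++ "_", acc.2 + 1) else acc
      else acc) acc = acc := by
  induction l with
  | nil => rfl
  | cons kv t ih =>
    simp only [List.map_cons, List.mem_cons, not_or] at h
    have hk : kv.1 ≠ "name" := Ne.symm h.1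
    have hstep : (if acc.2 < m then
        if kv.1 = "name" then (acc.1 ++ kv.2 ++ "_", acc.2 + 1) else acc
      else acc) = acc := by rw [if_neg hk, ite_self]
    simp only [List.foldl_cons, hstep]
    exact ih h.2

-- stripping the trailing '_' ( s[:-1] ) from v + '_' gives back v
theorem pv_slice_append (v : String) :
    PySem.Str.slice (v ++ "_") none (some (-1)) = v := by
  apply String.toList_injective
  rw [PySem.Str.slice_to_neg_one]
  simp

theorem pv_slice_empty : PySem.Str.slice "" none (some (-1)) = "" := by
  apply String.toList_injective
  rw [PySem.Str.slice_to_neg_one]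
  simp

-- main agreement lemma for max_num_key >= 1
theorem pv_main (m : Int) (hm : 1 ≤ m) (config : List (String × String))
    (hpre : (config.map Prod.fst).Nodup) :
    make_config_string config m = make_config_string_alt config m := by
  induction config with
  | nil =>
    have halt : make_config_string_alt [] m = "" := by
      simp [make_config_string_alt, hm, PySem.Dict.get?]
    rw [halt]
    exact pv_slice_empty
  | cons kv t ih =>
    obtain ⟨k, v⟩ := kv
    simp only [List.map_cons, List.nodup_cons] at hpre
    by_cases hk : k = "name"
    · subst hk
      have h0 : (0 : Int) < m := by omega
      have halt : make_config_string_alt (("name", v) :: t) m = v := by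
        simp [make_config_string_alt, hm, PySem.Dict.get?_mk_cons]
      rw [halt]
      simp only [make_config_string, List.foldl_cons,
        pv_foldl_no_name t m _ hpre.1]
      rw [if_pos h0]
      simp only [if_true]
      have hv : ("" : String) ++ v ++ "_" = v ++ "_" := by simp
      show PySem.Str.slice ("" ++ v ++ "_") none (some (-1)) = v
      rw [hv]
      exact pv_slice_append v
    · have halt : make_config_string_alt ((k, v) :: t) m = make_config_string_alt t m := by
        simp only [make_config_string_alt, PySem.Dict.get?_mk_cons, beq_iff_eq]
        rw [if_neg hk]
      have hstep : (if ((("" : String), (0 : Int))).2 < m then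
          if k = "name" then
            (((("" : String), (0 : Int))).1 ++ v ++ "_", ((("" : String), (0 : Int))).2 + 1)
          else (("" : String), (0 : Int))
        else (("" : String), (0 : Int))) = (("" : String), (0 : Int)) := by
        rw [if_neg hk, ite_self]
      have ha : make_config_string ((k, v) :: t) m = make_config_string t m := by
        simp only [make_config_string, List.foldl_cons, hstep]
      rw [ha, halt]
      exact ih hpre.2

-- ===== VERDICT (by name: the statement is the Claim_ definition above) =====
theorem make_config_string_spec : Claim_equal_make_config_string := by
  intro config m _hdom hpre
  show make_config_string config m = make_config_string_alt config m
  by_cases hm : 1 ≤ m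
  · exact pv_main m hm config hpre
  · have h0 : ¬ ((("" : String), (0 : Int))).2 < m := by
      show ¬ ((0 : Int) < m); omega
    simp only [make_config_string, make_config_string_alt, if_neg hm,
      pv_foldl_stuck config m ("", 0) h0]
    exact pv_slice_empty
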